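-- pv_equiv track=rewrite | github.com/MaximumCell/My-FYP | backend/utils/error_middleware.py | validate_model_name
-- ===== SOURCE A (Python) =====
-- def validate_model_name(name: str) -> str:
--     """Validate and sanitize model name"""
--     if not name:
--         raise ValueError("Model name is required")
--
--     name = name.strip()
--
--     if len(name) < 1 or len(name) > 100:
--         raise ValueError("Model name must be between 1 and 100 characters")
--
--     # Remove potentially dangerous characters
--     dangerous_chars = ['<', '>', '"', "'", '&', '/', '\\', '|']
--     for char in dangerous_chars:
--         name = name.replace(char, '')
--
--     if not name:
--         raise ValueError("Model name contains only invalid characters")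
--
--     return name
-- ===== SOURCE B (Python) =====
-- DANGEROUS = '<>"\'&/\\|'
--
--
-- def _sanitize(chars):
--     """Recursively rebuild the character list, dropping dangerous characters."""
--     if not chars:
--         return []
--     rest = _sanitize(chars[1:])
--     if chars[0] in DANGEROUS:
--         return rest
--     return [chars[0]] + rest
--
--
-- def validate_model_name(name: str) -> str:
--     """Validate and sanitize model name (recursive single pass over the characters)."""
--     if not name:
--         raise ValueError("Model name is required")
--
--     name = name.strip()
--
--     if not (1 <= len(name) <= 100):
--         raise ValueError("Model name must be between 1 and 100 characters")
--
--     cleaned = ''.join(_sanitize(list(name)))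
--
--     if not cleaned:
--         raise ValueError("Model name contains only invalid characters")
--
--     return cleaned
-- ===== Notes on version B (the rewrite author's own statement) =====
-- stated objective: alternative
-- what changed: A's eight staged replace passes (one full string scan per dangerous character) are replaced by one structurally recursive pass over the character list that drops each dangerous character as it is reached.
import Mathlib
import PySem

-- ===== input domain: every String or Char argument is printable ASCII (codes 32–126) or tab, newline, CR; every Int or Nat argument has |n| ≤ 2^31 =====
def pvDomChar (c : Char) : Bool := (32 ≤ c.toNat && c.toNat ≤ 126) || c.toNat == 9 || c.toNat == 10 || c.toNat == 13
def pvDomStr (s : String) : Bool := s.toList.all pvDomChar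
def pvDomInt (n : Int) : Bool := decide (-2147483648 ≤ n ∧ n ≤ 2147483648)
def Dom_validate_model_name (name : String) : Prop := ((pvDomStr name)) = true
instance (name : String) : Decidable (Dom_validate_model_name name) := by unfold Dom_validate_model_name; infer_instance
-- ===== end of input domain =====

-- B replaces A's eight staged replace passes by one structurally recursive pass over the characters (alternative decomposition; same values and exceptions).


-- ===== PORT A =====
-- A's list of dangerous characters, as the list of one-character strings it loops over
def dangerous_chars : List String := ["<", ">", "\"", "'", "&", "/", "\\", "|"]

-- Each `raise ValueError` branch of A is excluded by Pre_; the port returns "" there.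
def validate_model_name (name : String) : String :=
  if name == "" then ""
  else
    let n := PySem.Str.strip name
    if PySem.Str.len n < 1 || PySem.Str.len n > 100 then ""
    else
      let n2 := dangerous_chars.foldl (fun s c => PySem.Str.replace s c "") n
      if n2 == "" then "" else n2

-- ===== PORT B =====
-- B's DANGEROUS string constant; `c in DANGEROUS` is membership among its characters
def DANGEROUS : String := "<>\"'&/\\|"

-- B's recursive helper _sanitize
def sanitize : List Char → List Char
  | [] => []
  | h :: t =>
      let rest := sanitize t
      if DANGEROUS.toList.contains h then rest else h :: rest

-- Each `raise ValueError` branch of B is excluded by Pre_; the port returns "" there.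
def validate_model_name_alt (name : String) : String :=
  if name == "" then ""
  else
    let stripped := PySem.Str.strip name
    if !(1 ≤ PySem.Str.len stripped ∧ PySem.Str.len stripped ≤ 100 : Bool) then ""
    else
      let cleaned := String.ofList (sanitize stripped.toList)
      if cleaned == "" then "" else cleaned

-- ===== PRECONDITION & SPEC =====
-- Pre_ excludes exactly the inputs on which A raises ValueError: empty name, a stripped
-- length outside 1..100, or a stripped name consisting only of dangerous characters.
def Pre_validate_model_name (name : String) : Prop :=
  name ≠ "" ∧
  1 ≤ PySem.Str.len (PySem.Str.strip name) ∧
  PySem.Str.len (PySem.Str.strip name) ≤ 100 ∧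
  (PySem.Str.strip name).toList.any (fun c => !(DANGEROUS.toList.contains c)) = true
instance (name : String) : Decidable (Pre_validate_model_name name) := by
  unfold Pre_validate_model_name; infer_instance

def pvWitness_validate_model_name : String := " my model <1> "

def Spec_validate_model_name (name : String) (out : String) : Prop := out = validate_model_name_alt name
instance (name : String) (out : String) : Decidable (Spec_validate_model_name name out) := by unfold Spec_validate_model_name; infer_instance

-- ===== CLAIM (what is proved, stated in full; the proofs are below) =====
def Claim_equal_validate_model_name : Prop := ∀ (name : String), Dom_validate_model_name name → Pre_validate_model_name name → Spec_validate_model_name name (validate_model_name name)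

-- ===== LEMMAS AND PROOFS =====
lemma go_filter (c : Char) : ∀ (fuel : Nat) (l acc : List Char), l.length ≤ fuel →
    PySem.Chars.replace.go [c] [] fuel l acc = acc.reverse ++ l.filter (fun x => x != c) := by
  intro fuel
  induction fuel with
  | zero =>
    intro l acc h
    have : l = [] := List.eq_nil_of_length_eq_zero (Nat.le_zero.mp h)
    subst this
    simp [PySem.Chars.replace.go]
  | succ n ih =>
    intro l acc h
    cases l with
    | nil => simp [PySem.Chars.replace.go]
    | cons x t =>
      rw [PySem.Chars.replace.go]
      by_cases hx : x = c
      · subst hx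
        simp [List.isPrefixOf, ih t acc (by simpa using h)]
      · simp only [List.isPrefixOf, Bool.and_true]
        have : (c == x) = false := by simp [Ne.symm hx]
        rw [this]
        simp only [Bool.false_eq_true, if_false]
        rw [ih t (x :: acc) (by simpa using h)]
        simp [hx]

-- Python's s.replace(c, '') deletes every occurrence of the single character c
lemma replace_single (c : Char) (cs : List Char) :
    PySem.Chars.replace cs [c] [] = cs.filter (fun x => x != c) := by
  rw [PySem.Chars.replace]
  simpa using go_filter c cs.length cs [] (Nat.le_refl _)

-- B's recursive pass computes the filter that keeps non-dangerous characters
lemma sanitize_eq_filter (l : List Char) :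
    sanitize l = l.filter (fun c => !(DANGEROUS.toList.contains c)) := by
  induction l with
  | nil => simp [sanitize]
  | cons h t ih =>
    rw [sanitize]
    by_cases hd : h ∈ DANGEROUS.toList
    · simp [List.filter_cons, hd, ih]
    · simp [List.filter_cons, hd, ih]

-- A's replace chain over the 8 dangerous characters equals B's recursive pass
lemma chain_eq_sanitize (n : String) :
    dangerous_chars.foldl (fun s c => PySem.Str.replace s c "") n
      = String.ofList (sanitize n.toList) := by
  apply String.toList_inj.mp
  rw [sanitize_eq_filter]
  simp only [dangerous_chars, List.foldl_cons, List.foldl_nil]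
  simp only [PySem.Str.toList_replace,
    show ("<" : String).toList = ['<'] from rfl, show (">" : String).toList = ['>'] from rfl,
    show ("\"" : String).toList = ['"'] from rfl, show ("'" : String).toList = ['\''] from rfl,
    show ("&" : String).toList = ['&'] from rfl, show ("/" : String).toList = ['/'] from rfl,
    show ("\\" : String).toList = ['\\'] from rfl, show ("|" : String).toList = ['|'] from rfl,
    show ("" : String).toList = [] from rfl, replace_single]
  rw [String.toList_ofList]
  simp only [List.filter_filter]
  apply List.filter_congr
  intro x _
  simp [DANGEROUS, bne, Bool.and_assoc, Bool.beq_eq_decide_eq, Bool.and_comm, Bool.and_left_comm]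

-- ===== VERDICT (by name: the statement is the Claim_ definition above) =====
theorem validate_model_name_spec : Claim_equal_validate_model_name := by
  intro name _ hpre
  obtain ⟨h0, h1, h2, h3⟩ := hpre
  unfold Spec_validate_model_name validate_model_name validate_model_name_alt
  simp only [chain_eq_sanitize]
  simp only [PySem.Str.len, PySem.Str.strip, String.toList_ofList] at h1 h2
  have hne : PySem.Chars.strip name.toList ≠ [] := by
    intro h; rw [h] at h1; norm_num at h1
  simp [PySem.Str.len, PySem.Str.strip, String.toList_ofList, h1, h2, hne,
        show ¬((PySem.Chars.strip name.toList).length < 1) from by omega,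
        show ¬((PySem.Chars.strip name.toList).length > 100) from by omega]
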